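-- pv_equiv track=rewrite | github.com/masaki-sakata/EntityTree | scripts/eval_tree.py | _collect_unique_split_bitsets
-- ===== SOURCE A (Python) =====
-- from typing import Dict, Set, List, Tuple, Optional, Union
--
-- def _compute_leaf_sets(adjacency: Dict[int, List[int]], n_leaves: int) -> Dict[int, Set[int]]:
--     """
--     Compute and memoize the leaf set under each node.
--     Leaves are [0 .. n_leaves-1]. Non-listed nodes simply have empty children.
--     """
--     memo: Dict[int, Set[int]] = {}
--
--     # Collect all nodes that appear anywhere
--     nodes = set(adjacency.keys()) | {c for cs in adjacency.values() for c in cs} | set(range(n_leaves))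
--
--     def dfs(u: int) -> Set[int]:
--         if u in memo:
--             return memo[u]
--         if u < n_leaves:
--             memo[u] = {u}
--             return memo[u]
--         s: Set[int] = set()
--         for v in adjacency.get(u, []):
--             s |= dfs(v)
--         memo[u] = s
--         return s
--
--     for node in nodes:
--         dfs(node)
--     return memo
--
-- def _normalize_split_bitset(subset_bits: int, k: int, n_leaves: int) -> int:
--     """
--     無向 split の正規化：小さい側を代表に。k == n-k（真っ二つ）のときは
--     subset/complement のビット表現のうち整数として小さい方を代表にする。
--     """
--     universe = (1 << n_leaves) - 1
--     comp_bits = universe ^ subset_bits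
--     if k < (n_leaves - k):
--         return subset_bits
--     if k > (n_leaves - k):
--         return comp_bits
--     # k == n-k（タイ）
--     return min(subset_bits, comp_bits)
--
-- def _collect_unique_split_bitsets(adjacency: Dict[int, List[int]], n_leaves: int) -> Set[int]:
--     """
--     木のユニークな無向 split をビットセット（int）で収集。
--     各 edge-split（親→子）の子側にある葉集合を取り、小さい側（タイは上記関数）を代表に。
--     """
--     if n_leaves <= 1:
--         return set()
--
--     # 既存の leaf-set メモ化を利用
--     leaf_sets = _compute_leaf_sets(adjacency, n_leaves)
--     universe = set(range(n_leaves))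
--     splits: Set[int] = set()
--
--     def to_bits(leaves: Set[int]) -> int:
--         b = 0
--         for i in leaves:
--             b |= (1 << i)
--         return b
--
--     for parent, children in adjacency.items():
--         for ch in children:
--             subset = leaf_sets.get(ch, set())
--             k = len(subset)
--             if 0 < k < n_leaves:
--                 rep_bits = _normalize_split_bitset(to_bits(subset), k, n_leaves)
--                 splits.add(rep_bits)
--     return splits
-- ===== SOURCE B (Python) =====
-- def _collect_unique_split_bitsets(adjacency, n_leaves):
--     if n_leaves <= 1:
--         return set()
--     universe = (1 << n_leaves) - 1
--
--     def val(mask, v):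
--         # a leaf contributes its own bit; an internal node its table entry (0 if absent)
--         return (1 << v) if v < n_leaves else mask.get(v, 0)
--
--     # iterative round-based (Jacobi) fixpoint instead of recursion: each round
--     # recomputes every internal node's leaf bitmask from the previous table;
--     # after at most len(adjacency) rounds the table is the leaf-set table
--     internal = [(u, cs) for u, cs in adjacency.items() if u >= n_leaves]
--     mask = {u: 0 for u, _ in internal}
--     for _ in range(len(adjacency)):
--         new = {u: _or_all(mask, cs, val) for u, cs in internal}
--         if new == mask:
--             break
--         mask = new
--
--     splits = set()
--     for _, children in adjacency.items():
--         for ch in children: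
--             m = val(mask, ch)
--             k = m.bit_count()
--             if 0 < k < n_leaves:
--                 if 2 * k < n_leaves:
--                     rep = m
--                 elif 2 * k > n_leaves:
--                     rep = universe ^ m
--                 else:
--                     rep = min(m, universe ^ m)
--                 splits.add(rep)
--     return splits
--
--
-- def _or_all(mask, cs, val):
--     b = 0
--     for v in cs:
--         b |= val(mask, v)
--     return b
-- ===== Notes on version B (the rewrite author's own statement) =====
-- stated objective: alternative
-- what changed: A computes per-node leaf SETS by a recursive memoized DFS over every node and converts each child's set to bits in a second edge pass; B never recurses: it runs a round-based (Jacobi) fixpoint iteration that rebuilds a whole table of integer bitmasks for the internal keys each round (stopping when the table is stable), then reads the converged table in one edge scan with popcount-based inline normalization.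
import Mathlib
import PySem

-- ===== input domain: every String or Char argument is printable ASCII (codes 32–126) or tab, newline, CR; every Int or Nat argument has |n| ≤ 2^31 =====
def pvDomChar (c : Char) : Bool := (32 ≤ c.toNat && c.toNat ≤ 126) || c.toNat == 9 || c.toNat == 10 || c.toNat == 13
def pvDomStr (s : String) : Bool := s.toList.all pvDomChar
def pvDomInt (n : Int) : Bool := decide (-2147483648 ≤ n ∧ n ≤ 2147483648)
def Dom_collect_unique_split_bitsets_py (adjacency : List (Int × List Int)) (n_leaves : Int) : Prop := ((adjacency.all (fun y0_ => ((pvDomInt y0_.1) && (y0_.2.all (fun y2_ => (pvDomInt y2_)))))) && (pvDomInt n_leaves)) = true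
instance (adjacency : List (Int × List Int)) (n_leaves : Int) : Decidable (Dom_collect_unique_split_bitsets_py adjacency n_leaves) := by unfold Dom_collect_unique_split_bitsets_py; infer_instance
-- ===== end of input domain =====

-- B replaces A's recursive memoized DFS over per-node Python sets by a non-recursive
-- round-based fixpoint iteration on a table of integer bitmasks, read off in one edge
-- scan (alternative decomposition, similar cost); return value is a set, so only set
-- contents are compared.

-- ===== PORT A =====
-- helper: _normalize_split_bitset
def pvA_normalize (subset_bits : Int) (k : Int) (n_leaves : Int) : Int :=
  let universe_ : Int := (1 <<< n_leaves.toNat) - 1  -- (1 << n_leaves) - 1; exact: call sites have 2 ≤ n_leaves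
  let comp_bits := PySem.Int.bxor universe_ subset_bits
  if k < n_leaves - k then subset_bits
  else if n_leaves - k < k then comp_bits
  else min subset_bits comp_bits

-- helper: dfs of _compute_leaf_sets; the fuel (first argument) is a totality guard only —
-- under Pre_ (acyclic) the recursion depth is below adjacency.length + 1, the fuel at every call site
def pvA_dfs (adjacency : List (Int × List Int)) (n_leaves : Int) :
    Nat → PySem.Dict Int (PySem.Set Int) → Int → PySem.Set Int × PySem.Dict Int (PySem.Set Int)
  | 0, memo, _ => (PySem.Set.empty, memo)  -- unreachable under Pre_
  | fuel+1, memo, u =>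
    match PySem.Dict.get? memo u with
    | some s => (s, memo)
    | none =>
      if u < n_leaves then
        let s := PySem.Set.add PySem.Set.empty u
        (s, PySem.Dict.insert memo u s)
      else
        let r := (PySem.Dict.getD (PySem.Dict.mk adjacency) u []).foldl
          (fun (acc : PySem.Set Int × PySem.Dict Int (PySem.Set Int)) v =>
            let p := pvA_dfs adjacency n_leaves fuel acc.2 v
            (PySem.Set.union acc.1 p.1, p.2))
          (PySem.Set.empty, memo)
        (r.1, PySem.Dict.insert r.2 u r.1)

-- _compute_leaf_sets: dfs over every node; the Python iterates `nodes` in set (hash) order, the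
-- port in first-insertion order — the final memo MAPPING is the same for any order (each entry's
-- value is a pure function of the graph), and only lookups of it are used below.
def pvA_compute_leaf_sets (adjacency : List (Int × List Int)) (n_leaves : Int) :
    PySem.Dict Int (PySem.Set Int) :=
  let nodes : PySem.Set Int :=
    PySem.Set.update (PySem.Set.update (PySem.Set.ofList (adjacency.map Prod.fst))
      (adjacency.flatMap Prod.snd)) (PySem.List.pyRange 0 n_leaves 1)
  nodes.foldl (fun memo node => (pvA_dfs adjacency n_leaves (adjacency.length + 1) memo node).2)
    PySem.Dict.empty

-- helper: to_bits (iterates the stored set; any order gives the same OR)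
def pvA_to_bits (leaves : PySem.Set Int) : Int :=
  leaves.foldl (fun b i => PySem.Int.bor b (1 <<< i.toNat)) 0  -- b |= 1 << i; exact for 0 ≤ i (Pre_)

-- _collect_unique_split_bitsets (the local `universe = set(range(n_leaves))` is unused in A: omitted)
def collect_unique_split_bitsets_py (adjacency : List (Int × List Int)) (n_leaves : Int) : List Int :=
  if n_leaves ≤ 1 then [] else
  let leaf_sets := pvA_compute_leaf_sets adjacency n_leaves
  adjacency.foldl (fun (splits : PySem.Set Int) pc =>
    pc.2.foldl (fun (splits : PySem.Set Int) ch =>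
      let subset := (PySem.Dict.get? leaf_sets ch).getD PySem.Set.empty
      let k : Int := PySem.Set.len subset
      if 0 < k ∧ k < n_leaves then
        PySem.Set.add splits (pvA_normalize (pvA_to_bits subset) k n_leaves)
      else splits) splits) PySem.Set.empty

-- ===== PORT B =====
-- Source B's val(mask, v)
def pvB_val (n_leaves : Int) (mask : PySem.Dict Int Int) (v : Int) : Int :=
  if v < n_leaves then (1 <<< v.toNat : Int)  -- 1 << v; exact for 0 ≤ v (Pre_)
  else PySem.Dict.getD mask v 0

-- Source B's _or_all(mask, cs, val)
def pvB_orAll (n_leaves : Int) (mask : PySem.Dict Int Int) (cs : List Int) : Int :=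
  cs.foldl (fun b v => PySem.Int.bor b (pvB_val n_leaves mask v)) 0

-- Source B's `internal = [(u, cs) for u, cs in adjacency.items() if u >= n_leaves]`
def pvB_internal (adjacency : List (Int × List Int)) (n_leaves : Int) : List (Int × List Int) :=
  adjacency.filter (fun p => decide (n_leaves ≤ p.1))

-- one round: `new = {u: _or_all(mask, cs, val) for u, cs in internal}`
def pvB_step (adjacency : List (Int × List Int)) (n_leaves : Int)
    (mask : PySem.Dict Int Int) : PySem.Dict Int Int :=
  PySem.Dict.mk ((pvB_internal adjacency n_leaves).map
    (fun p => (p.1, pvB_orAll n_leaves mask p.2)))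

-- the `for _ in range(len(adjacency)): … if new == mask: break` loop; the counter is the range
-- bound. Python's order-insensitive dict == coincides with Dict equality here: both dicts carry
-- the key sequence of `internal`.
def pvB_loop (adjacency : List (Int × List Int)) (n_leaves : Int) :
    Nat → PySem.Dict Int Int → PySem.Dict Int Int
  | 0, mask => mask
  | k+1, mask =>
    let new := pvB_step adjacency n_leaves mask
    if new = mask then new else pvB_loop adjacency n_leaves k new

def collect_unique_split_bitsets_py_alt (adjacency : List (Int × List Int)) (n_leaves : Int) :
    List Int :=
  if n_leaves ≤ 1 then [] else
  let universe_ : Int := (1 <<< n_leaves.toNat) - 1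
  let mask := pvB_loop adjacency n_leaves adjacency.length
    (PySem.Dict.mk ((pvB_internal adjacency n_leaves).map (fun p => (p.1, (0:Int)))))
  adjacency.foldl (fun (splits : PySem.Set Int) pc =>
    pc.2.foldl (fun (splits : PySem.Set Int) ch =>
      let m := pvB_val n_leaves mask ch
      let k : Int := (PySem.Int.bitCount m : Int)
      if 0 < k ∧ k < n_leaves then
        let rep : Int :=
          if 2*k < n_leaves then m
          else if n_leaves < 2*k then PySem.Int.bxor universe_ m
          else min m (PySem.Int.bxor universe_ m)
        PySem.Set.add splits rep
      else splits) splits) PySem.Set.empty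

-- ===== PRECONDITION & SPEC =====
def pvChildren (adjacency : List (Int × List Int)) (u : Int) : List Int :=
  PySem.Dict.getD (PySem.Dict.mk adjacency) u []

def pvInternalKeys (adjacency : List (Int × List Int)) (n_leaves : Int) : List Int :=
  (adjacency.map Prod.fst).filter (fun u => n_leaves ≤ u)

-- topological peeling of the child relation among internal keys: a key survives a round iff it
-- still has a surviving internal-key child; on an acyclic relation everything is peeled away
def pvPeel (adjacency : List (Int × List Int)) (n_leaves : Int) : Nat → List Int
  | 0 => pvInternalKeys adjacency n_leaves
  | i+1 => (pvPeel adjacency n_leaves i).filter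
      (fun u => (pvChildren adjacency u).any
        (fun v => decide (n_leaves ≤ v) && (pvPeel adjacency n_leaves i).contains v))

-- Pre_ = exactly where the Python A returns normally: with more than one leaf it raises
-- ValueError (`1 << negative`) if some child id is negative, and RecursionError if the child
-- relation among internal keys has a directed cycle (checked here by topological peeling).
def Pre_collect_unique_split_bitsets_py (adjacency : List (Int × List Int)) (n_leaves : Int) : Prop :=
  1 < n_leaves →
    ((∀ p ∈ adjacency, ∀ v ∈ p.2, 0 ≤ v) ∧
     pvPeel adjacency n_leaves (pvInternalKeys adjacency n_leaves).length = [])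

instance (adjacency : List (Int × List Int)) (n_leaves : Int) :
    Decidable (Pre_collect_unique_split_bitsets_py adjacency n_leaves) := by
  unfold Pre_collect_unique_split_bitsets_py; infer_instance

def pvWitness_collect_unique_split_bitsets_py : (List (Int × List Int)) × Int :=
  ([(4, [3, 2]), (3, [0, 1])], 3)

def Spec_collect_unique_split_bitsets_py (adjacency : List (Int × List Int)) (n_leaves : Int) (out : List Int) : Prop := out = collect_unique_split_bitsets_py_alt adjacency n_leaves
instance (adjacency : List (Int × List Int)) (n_leaves : Int) (out : List Int) : Decidable (Spec_collect_unique_split_bitsets_py adjacency n_leaves out) := by unfold Spec_collect_unique_split_bitsets_py; infer_instance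

-- ===== CLAIM (what is proved, stated in full; the proofs are below) =====
def Claim_equal_collect_unique_split_bitsets_py : Prop := ∀ (adjacency : List (Int × List Int)) (n_leaves : Int), Dom_collect_unique_split_bitsets_py adjacency n_leaves → Pre_collect_unique_split_bitsets_py adjacency n_leaves → Spec_collect_unique_split_bitsets_py adjacency n_leaves (collect_unique_split_bitsets_py adjacency n_leaves)

-- ===== LEMMAS AND PROOFS =====

-- ---------- measure from the peeling ----------
def pvN (a : List (Int × List Int)) (n : Int) : Nat := (pvInternalKeys a n).length

def pvMu (a : List (Int × List Int)) (n : Int) (u : Int) : Nat :=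
  (List.range (pvN a n + 1)).countP (fun i => decide (u ∈ pvPeel a n i))

-- ---------- fuel-indexed pure specifications ----------
def pvSpecSet (a : List (Int × List Int)) (n : Int) : Nat → Int → PySem.Set Int
  | 0, _ => PySem.Set.empty
  | f+1, u =>
    if u < n then PySem.Set.add PySem.Set.empty u
    else (pvChildren a u).foldl (fun s v => PySem.Set.union s (pvSpecSet a n f v)) PySem.Set.empty

def pvSpecMask (a : List (Int × List Int)) (n : Int) : Nat → Int → Int
  | 0, _ => 0
  | f+1, u =>
    if u < n then (1 <<< u.toNat : Int)
    else (pvChildren a u).foldl (fun m v => PySem.Int.bor m (pvSpecMask a n f v)) 0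

def pvLSet (a : List (Int × List Int)) (n : Int) (u : Int) : PySem.Set Int :=
  pvSpecSet a n (pvMu a n u + 1) u

def pvLMask (a : List (Int × List Int)) (n : Int) (u : Int) : Int :=
  pvSpecMask a n (pvMu a n u + 1) u

-- ---------- peeling lemmas ----------
theorem pvPeel_succ_subset (a : List (Int × List Int)) (n : Int) (i : Nat) (u : Int)
    (h : u ∈ pvPeel a n (i+1)) : u ∈ pvPeel a n i := by
  simp only [pvPeel] at h
  exact (List.mem_filter.mp h).1

theorem pvPeel_subset_keys (a : List (Int × List Int)) (n : Int) (i : Nat) (u : Int)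
    (h : u ∈ pvPeel a n i) : u ∈ pvInternalKeys a n := by
  induction i with
  | zero => exact h
  | succ i ih => exact ih (pvPeel_succ_subset a n i u h)

theorem pvPeel_antitone (a : List (Int × List Int)) (n : Int) (i j : Nat) (hij : i ≤ j) (u : Int)
    (h : u ∈ pvPeel a n j) : u ∈ pvPeel a n i := by
  induction j with
  | zero =>
    have : i = 0 := by omega
    rw [this]; exact h
  | succ j ih =>
    rcases Nat.lt_or_ge i (j+1) with hlt | hge
    · exact ih (by omega) (pvPeel_succ_subset a n j u h)
    · have : i = j+1 := by omega
      rw [this]; exact h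

theorem pvMu_le_of_not_mem (a : List (Int × List Int)) (n : Int) (i : Nat) (u : Int)
    (h : u ∉ pvPeel a n i) : pvMu a n u ≤ i := by
  have key : ∀ j, decide (u ∈ pvPeel a n j) = true → j < i := by
    intro j hj
    by_contra hji
    exact h (pvPeel_antitone a n i j (by omega) u (of_decide_eq_true hj))
  unfold pvMu
  rw [List.countP_eq_length_filter]
  have hsub : ((List.range (pvN a n + 1)).filter (fun j => decide (u ∈ pvPeel a n j))) ⊆
      List.range i := by
    intro x hx
    exact List.mem_range.mpr (key x (List.mem_filter.mp hx).2)
  have hnd : ((List.range (pvN a n + 1)).filter (fun j => decide (u ∈ pvPeel a n j))).Nodup :=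
    (List.nodup_range).filter _
  calc ((List.range (pvN a n + 1)).filter (fun j => decide (u ∈ pvPeel a n j))).length
      ≤ (List.range i).length := (hnd.subperm hsub).length_le
    _ = i := by simp

theorem pvMem_of_lt_mu (a : List (Int × List Int)) (n : Int) (i : Nat) (u : Int)
    (h : i < pvMu a n u) : u ∈ pvPeel a n i := by
  by_contra h'
  have := pvMu_le_of_not_mem a n i u h'
  omega

theorem pvMu_gt_of_mem (a : List (Int × List Int)) (n : Int) (i : Nat) (u : Int)
    (hi : i ≤ pvN a n) (h : u ∈ pvPeel a n i) : i < pvMu a n u := by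
  have hall : ∀ j ∈ List.range (i+1), decide (u ∈ pvPeel a n j) = true := by
    intro j hj
    have hj' := List.mem_range.mp hj
    exact decide_eq_true (pvPeel_antitone a n j i (by omega) u h)
  have h1 : (List.range (i+1)).countP (fun j => decide (u ∈ pvPeel a n j)) = i+1 := by
    rw [List.countP_eq_length.mpr hall]; simp
  have h2 : (List.range (i+1)).countP (fun j => decide (u ∈ pvPeel a n j)) ≤
      (List.range (pvN a n + 1)).countP (fun j => decide (u ∈ pvPeel a n j)) :=
    (List.range_sublist.mpr (by omega)).countP_le
  unfold pvMu
  omega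

theorem pvChildren_ne_nil_key (a : List (Int × List Int)) (u : Int)
    (h : pvChildren a u ≠ []) : u ∈ a.map Prod.fst := by
  by_contra hk
  rcases Bool.eq_false_or_eq_true ((PySem.Dict.mk a).contains u) with hc | hc
  · have h1 := (PySem.Dict.contains_iff_mem_keys _ u).mp hc
    have h2 : u ∈ a.map Prod.fst := by simpa [PySem.Dict.keys_mk] using h1
    exact hk h2
  · exact h (PySem.Dict.getD_of_not_contains _ _ hc)

theorem pvChildren_nonneg (a : List (Int × List Int)) (hnn : ∀ p ∈ a, ∀ v ∈ p.2, (0:Int) ≤ v)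
    (u : Int) : ∀ v ∈ pvChildren a u, (0:Int) ≤ v := by
  intro v hv
  unfold pvChildren at hv
  rw [PySem.Dict.getD_eq_get?_getD] at hv
  cases hg : PySem.Dict.get? (PySem.Dict.mk a) u with
  | none => rw [hg] at hv; simp at hv
  | some cs =>
    rw [hg] at hv
    simp only [Option.getD_some] at hv
    exact hnn (u, cs) (PySem.Dict.mem_items_of_get?_eq_some _ hg) v hv

theorem pvMu_le_N (a : List (Int × List Int)) (n : Int)
    (hacyc : pvPeel a n (pvN a n) = []) (u : Int) : pvMu a n u ≤ pvN a n := by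
  refine pvMu_le_of_not_mem a n _ u ?_
  rw [hacyc]
  simp

theorem pvMu_child_lt (a : List (Int × List Int)) (n : Int)
    (hacyc : pvPeel a n (pvN a n) = []) (u v : Int)
    (hu : n ≤ u) (hv : v ∈ pvChildren a u) : pvMu a n v < pvMu a n u := by
  have hne : pvChildren a u ≠ [] := List.ne_nil_of_mem hv
  have hukey : u ∈ a.map Prod.fst := pvChildren_ne_nil_key a u hne
  have huK : u ∈ pvInternalKeys a n := by
    unfold pvInternalKeys
    exact List.mem_filter.mpr ⟨hukey, decide_eq_true hu⟩
  have hu0 : u ∈ pvPeel a n 0 := huK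
  have hmupos : 0 < pvMu a n u := pvMu_gt_of_mem a n 0 u (Nat.zero_le _) hu0
  have hmuN : pvMu a n u ≤ pvN a n := pvMu_le_N a n hacyc u
  by_contra h'
  have hle : pvMu a n u ≤ pvMu a n v := by omega
  have h1 : u ∈ pvPeel a n (pvMu a n u - 1) := pvMem_of_lt_mu a n _ u (by omega)
  have h2 : v ∈ pvPeel a n (pvMu a n u - 1) := pvMem_of_lt_mu a n _ v (by omega)
  have hvK : v ∈ pvInternalKeys a n := pvPeel_subset_keys a n _ v h2
  have hvn : n ≤ v := by
    unfold pvInternalKeys at hvK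
    exact of_decide_eq_true (List.mem_filter.mp hvK).2
  have h3 : u ∈ pvPeel a n ((pvMu a n u - 1) + 1) := by
    simp only [pvPeel]
    refine List.mem_filter.mpr ⟨h1, ?_⟩
    refine List.any_eq_true.mpr ⟨v, hv, ?_⟩
    simp [hvn, h2]
  have h4 : pvMu a n u - 1 + 1 ≤ pvN a n := by omega
  have := pvMu_gt_of_mem a n _ u h4 h3
  omega

theorem pvN_le_len (a : List (Int × List Int)) (n : Int) : pvN a n ≤ a.length := by
  unfold pvN pvInternalKeys
  calc ((a.map Prod.fst).filter fun u => decide (n ≤ u)).length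
      ≤ (a.map Prod.fst).length := List.length_filter_le _ _
    _ = a.length := List.length_map _

-- ---------- stability of the specs in the fuel ----------
theorem pvSpecSet_stable (a : List (Int × List Int)) (n : Int)
    (hacyc : pvPeel a n (pvN a n) = []) :
    ∀ f g u, pvMu a n u < f → pvMu a n u < g → pvSpecSet a n f u = pvSpecSet a n g u := by
  intro f
  induction f with
  | zero => intro g u h1 h2; exact absurd h1 (Nat.not_lt_zero _)
  | succ f ih =>
    intro g u h1 h2
    cases g with
    | zero => exact absurd h2 (Nat.not_lt_zero _)
    | succ g =>
      simp only [pvSpecSet]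
      by_cases hu : u < n
      · simp [hu]
      · simp only [if_neg hu]
        refine PySem.List.foldl_congr_mem _ _ _ _ ?_
        intro acc x hx
        have hμx : pvMu a n x < pvMu a n u :=
          pvMu_child_lt a n hacyc u x (by omega) hx
        rw [ih g x (by omega) (by omega)]

theorem pvSpecMask_stable (a : List (Int × List Int)) (n : Int)
    (hacyc : pvPeel a n (pvN a n) = []) :
    ∀ f g u, pvMu a n u < f → pvMu a n u < g → pvSpecMask a n f u = pvSpecMask a n g u := by
  intro f
  induction f with
  | zero => intro g u h1 h2; exact absurd h1 (Nat.not_lt_zero _)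
  | succ f ih =>
    intro g u h1 h2
    cases g with
    | zero => exact absurd h2 (Nat.not_lt_zero _)
    | succ g =>
      simp only [pvSpecMask]
      by_cases hu : u < n
      · simp [hu]
      · simp only [if_neg hu]
        refine PySem.List.foldl_congr_mem _ _ _ _ ?_
        intro acc x hx
        have hμx : pvMu a n x < pvMu a n u :=
          pvMu_child_lt a n hacyc u x (by omega) hx
        rw [ih g x (by omega) (by omega)]

-- ---------- bit-level facts ----------
def pcN (m : Nat) : Nat :=
  if h : m = 0 then 0 else m % 2 + pcN (m / 2)
decreasing_by exact Nat.div_lt_self (Nat.pos_of_ne_zero h) one_lt_two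

theorem pcN_eq (m : Nat) : pcN m = m % 2 + pcN (m / 2) := by
  by_cases h : m = 0
  · subst h; simp [pcN]
  · rw [pcN]; simp [h]

theorem pvBitCount_cast (m : Nat) : PySem.Int.bitCount (m : Int) = pcN m := by
  induction m using Nat.strong_induction_on with
  | _ m ih =>
    by_cases h : m = 0
    · subst h; simp [pcN, PySem.Int.bitCount_zero]
    · rw [PySem.Int.bitCount_natCast (Nat.pos_of_ne_zero h),
        ih (m/2) (Nat.div_lt_self (Nat.pos_of_ne_zero h) one_lt_two), pcN_eq m]

theorem pcN_or_pow : ∀ (j : Nat), ∀ (m : Nat), m.testBit j = false →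
    pcN (m ||| (1 <<< j)) = pcN m + 1 := by
  intro j
  induction j with
  | zero =>
    intro m h
    have hdiv : (m ||| 1 <<< 0) / 2 = m / 2 := by
      rw [Nat.or_div_two]; simp
    have hm2 : m % 2 = 0 := by
      have h0 := Nat.testBit_zero m
      rw [h] at h0
      have h1 : ¬ (m % 2 = 1) := by
        intro hc; simp [hc] at h0
      omega
    have hx2 : (m ||| 1 <<< 0) % 2 = 1 := by
      have hb : (m ||| 1 <<< 0).testBit 0 = true := by
        simp
      rw [Nat.testBit_zero] at hb
      exact of_decide_eq_true hb
    rw [pcN_eq (m ||| 1 <<< 0), hdiv, hx2, pcN_eq m, hm2]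
    omega
  | succ j ih =>
    intro m h
    have hc : (1:Nat) <<< (j+1) = 2 * (1 <<< j) := by
      rw [Nat.one_shiftLeft, Nat.one_shiftLeft, pow_succ]; ring
    rw [hc]
    have hdiv : (m ||| 2 * (1 <<< j)) / 2 = m / 2 ||| (1 <<< j) := by
      rw [Nat.or_div_two, Nat.mul_div_cancel_left _ (by norm_num : (0:Nat) < 2)]
    have hmod : (m ||| 2 * (1 <<< j)) % 2 = m % 2 := by
      have hb : (m ||| 2 * (1 <<< j)).testBit 0 = m.testBit 0 := by
        rw [Nat.testBit_or]
        have h2 : (2 * (1 <<< j)).testBit 0 = false := by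
          rw [Nat.testBit_zero]
          simp [Nat.mul_mod_right]
        rw [h2, Bool.or_false]
      rw [Nat.testBit_zero, Nat.testBit_zero] at hb
      have := decide_eq_decide.mp hb
      omega
    have hdb : (m / 2).testBit j = false := by
      rw [Nat.testBit_div_two]; exact h
    rw [pcN_eq (m ||| 2 * (1 <<< j)), hdiv, hmod, ih (m/2) hdb, pcN_eq m]
    omega

def pvNB (s : List Int) (b : Nat) : Nat := s.foldl (fun x i => x ||| (1 <<< i.toNat)) b

theorem pvToBits_cast : ∀ (s : List Int) (b : Nat),
    s.foldl (fun x i => PySem.Int.bor x (1 <<< i.toNat)) (b : Int) = ((pvNB s b : Nat) : Int) := by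
  intro s
  induction s with
  | nil => intro b; simp [pvNB]
  | cons x s ih =>
    intro b
    simp only [pvNB, List.foldl_cons]
    rw [PySem.Int.bor_natCast]
    exact ih (b ||| 1 <<< x.toNat)

theorem pvToBits_eq (s : PySem.Set Int) : pvA_to_bits s = ((pvNB s 0 : Nat) : Int) := by
  have h := pvToBits_cast s 0
  simpa [pvA_to_bits] using h

theorem pvTestBit_pvNB : ∀ (s : List Int) (b : Nat) (j : Nat),
    (pvNB s b).testBit j = (b.testBit j || s.any fun i => i.toNat == j) := by
  intro s
  induction s with
  | nil => intro b j; simp [pvNB]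
  | cons x s ih =>
    intro b j
    simp only [pvNB, List.foldl_cons]
    rw [show (s.foldl (fun a i => a ||| 1 <<< i.toNat) (b ||| 1 <<< x.toNat))
        = pvNB s (b ||| 1 <<< x.toNat) from rfl, ih]
    rw [Nat.testBit_or, Nat.one_shiftLeft, Nat.testBit_two_pow]
    simp only [List.any_cons]
    by_cases hxj : x.toNat = j
    · simp [hxj]
    · have hb2 : (x.toNat == j) = false := beq_eq_false_iff_ne.mpr hxj
      simp [hxj, hb2]

theorem pcN_pvNB : ∀ (s : List Int) (b : Nat), s.Nodup → (∀ i ∈ s, (0:Int) ≤ i) →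
    (∀ i ∈ s, b.testBit i.toNat = false) → pcN (pvNB s b) = pcN b + s.length := by
  intro s
  induction s with
  | nil => intro b _ _ _; simp [pvNB]
  | cons x s ih =>
    intro b hnd hpos hb
    simp only [pvNB, List.foldl_cons]
    have hx0 : b.testBit x.toNat = false := hb x (List.mem_cons_self)
    have hstep : pcN (b ||| 1 <<< x.toNat) = pcN b + 1 := pcN_or_pow x.toNat b hx0
    have hnd' := List.nodup_cons.mp hnd
    have hb' : ∀ i ∈ s, (b ||| 1 <<< x.toNat).testBit i.toNat = false := by
      intro i hi
      rw [Nat.testBit_or, hb i (List.mem_cons_of_mem _ hi), Nat.one_shiftLeft,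
        Nat.testBit_two_pow]
      have hxi : x ≠ i := fun hxe => hnd'.1 (hxe ▸ hi)
      have h1 := hpos x (List.mem_cons_self)
      have h2 := hpos i (List.mem_cons_of_mem _ hi)
      have hne : x.toNat ≠ i.toNat := by omega
      simp [hne]
    have hrec := ih (b ||| 1 <<< x.toNat) hnd'.2
      (fun i hi => hpos i (List.mem_cons_of_mem _ hi)) hb'
    rw [show (s.foldl (fun a i => a ||| 1 <<< i.toNat) (b ||| 1 <<< x.toNat))
        = pvNB s (b ||| 1 <<< x.toNat) from rfl, hrec, hstep]
    simp [List.length_cons]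
    omega

theorem pvNB_union (s t : PySem.Set Int) :
    pvNB (PySem.Set.union s t) 0 = pvNB s 0 ||| pvNB t 0 := by
  apply Nat.eq_of_testBit_eq
  intro j
  rw [Nat.testBit_or, pvTestBit_pvNB, pvTestBit_pvNB, pvTestBit_pvNB]
  simp only [Nat.zero_testBit, Bool.false_or]
  refine Bool.eq_iff_iff.mpr ?_
  simp only [List.any_eq_true, Bool.or_eq_true]
  constructor
  · rintro ⟨i, hi, hp⟩
    rcases (PySem.Set.mem_union s t i).mp hi with hm | hm
    · exact Or.inl ⟨i, hm, hp⟩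
    · exact Or.inr ⟨i, hm, hp⟩
  · rintro (⟨i, hi, hp⟩ | ⟨i, hi, hp⟩)
    · exact ⟨i, (PySem.Set.mem_union s t i).mpr (Or.inl hi), hp⟩
    · exact ⟨i, (PySem.Set.mem_union s t i).mpr (Or.inr hi), hp⟩

-- ---------- correspondence between the two specs ----------
theorem pvToBits_spec (a : List (Int × List Int)) (n : Int) :
    ∀ f u, pvA_to_bits (pvSpecSet a n f u) = pvSpecMask a n f u := by
  intro f
  induction f with
  | zero => intro u; rfl
  | succ f ih =>
    intro u
    simp only [pvSpecSet, pvSpecMask]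
    by_cases hu : u < n
    · simp only [if_pos hu]
      have h0 : pvA_to_bits (PySem.Set.add PySem.Set.empty u)
          = PySem.Int.bor 0 (1 <<< u.toNat) := rfl
      rw [h0, PySem.Int.bor_comm, PySem.Int.bor_zero]
    · simp only [if_neg hu]
      have aux : ∀ (cs : List Int) (sacc : PySem.Set Int) (macc : Int),
          pvA_to_bits sacc = macc →
          pvA_to_bits (cs.foldl (fun s v => PySem.Set.union s (pvSpecSet a n f v)) sacc)
            = cs.foldl (fun m v => PySem.Int.bor m (pvSpecMask a n f v)) macc := by
        intro cs
        induction cs with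
        | nil => intro sacc macc h; exact h
        | cons v cs ihc =>
          intro sacc macc h
          simp only [List.foldl_cons]
          apply ihc
          rw [pvToBits_eq (PySem.Set.union sacc (pvSpecSet a n f v)), pvNB_union,
            ← PySem.Int.bor_natCast, ← pvToBits_eq sacc, ← pvToBits_eq (pvSpecSet a n f v),
            h, ih v]
      exact aux _ _ _ rfl

theorem pvSpecSet_nodup (a : List (Int × List Int)) (n : Int) :
    ∀ f u, (pvSpecSet a n f u).Nodup := by
  intro f
  induction f with
  | zero => intro u; exact List.nodup_nil
  | succ f ih =>
    intro u
    simp only [pvSpecSet]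
    by_cases hu : u < n
    · simp [hu]
    · simp only [if_neg hu]
      have aux : ∀ (cs : List Int) (acc : PySem.Set Int), acc.Nodup →
          (cs.foldl (fun s v => PySem.Set.union s (pvSpecSet a n f v)) acc).Nodup := by
        intro cs
        induction cs with
        | nil => intro acc h; exact h
        | cons v cs ihc => intro acc h; exact ihc _ (PySem.Set.nodup_union _ _ h)
      exact aux _ _ List.nodup_nil

theorem pvSpecSet_nonneg (a : List (Int × List Int)) (n : Int)
    (hnn : ∀ p ∈ a, ∀ v ∈ p.2, (0:Int) ≤ v) :
    ∀ f u, 0 ≤ u → ∀ x ∈ pvSpecSet a n f u, (0:Int) ≤ x := by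
  intro f
  induction f with
  | zero => intro u _ x hx; simp [pvSpecSet] at hx
  | succ f ih =>
    intro u hu x hx
    simp only [pvSpecSet] at hx
    by_cases hlt : u < n
    · rw [if_pos hlt] at hx
      have hxu : x = u := by simpa using hx
      rw [hxu]; exact hu
    · rw [if_neg hlt] at hx
      have aux : ∀ (cs : List Int), (∀ v ∈ cs, (0:Int) ≤ v) → ∀ (acc : PySem.Set Int),
          (∀ y ∈ acc, (0:Int) ≤ y) →
          ∀ y ∈ cs.foldl (fun s v => PySem.Set.union s (pvSpecSet a n f v)) acc, (0:Int) ≤ y := by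
        intro cs
        induction cs with
        | nil => intro _ acc hacc y hy; exact hacc y hy
        | cons v cs ihc =>
          intro hcs acc hacc y hy
          refine ihc (fun w hw => hcs w (List.mem_cons_of_mem _ hw)) _ ?_ y hy
          intro z hz
          rcases (PySem.Set.mem_union _ _ z).mp hz with hm | hm
          · exact hacc z hm
          · exact ih v (hcs v (List.mem_cons_self)) z hm
      exact aux _ (pvChildren_nonneg a hnn u) _ (by intro y hy; simp at hy) x hx

theorem pvLen_spec (a : List (Int × List Int)) (n : Int)
    (hnn : ∀ p ∈ a, ∀ v ∈ p.2, (0:Int) ≤ v) (f : Nat) (u : Int) (hu : 0 ≤ u) :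
    PySem.Set.len (pvSpecSet a n f u) = ((PySem.Int.bitCount (pvSpecMask a n f u) : Nat) : Int) := by
  have hset := pvToBits_spec a n f u
  have h1 : PySem.Set.len (pvSpecSet a n f u) = ((pvSpecSet a n f u).length : Int) := rfl
  have h2 : pvA_to_bits (pvSpecSet a n f u) = ((pvNB (pvSpecSet a n f u) 0 : Nat) : Int) :=
    pvToBits_eq _
  have h3 : pvSpecMask a n f u = ((pvNB (pvSpecSet a n f u) 0 : Nat) : Int) := by
    rw [← hset, h2]
  rw [h1, h3, pvBitCount_cast]
  have h4 : pcN (pvNB (pvSpecSet a n f u) 0) = pcN 0 + (pvSpecSet a n f u).length :=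
    pcN_pvNB _ 0 (pvSpecSet_nodup a n f u) (pvSpecSet_nonneg a n hnn f u hu)
      (fun i _ => Nat.zero_testBit _)
  rw [h4]
  simp [pcN]

-- ---------- A's memoised run computes the spec ----------
def pvInvA (a : List (Int × List Int)) (n : Int) (memo : PySem.Dict Int (PySem.Set Int)) : Prop :=
  ∀ k s, PySem.Dict.get? memo k = some s → s = pvLSet a n k

theorem pvA_run (a : List (Int × List Int)) (n : Int)
    (hacyc : pvPeel a n (pvN a n) = []) :
    ∀ f u memo, pvMu a n u < f → pvInvA a n memo →
      (pvA_dfs a n f memo u).1 = pvLSet a n u ∧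
      pvInvA a n (pvA_dfs a n f memo u).2 ∧
      (∀ k s, PySem.Dict.get? memo k = some s →
        PySem.Dict.get? (pvA_dfs a n f memo u).2 k = some s) ∧
      PySem.Dict.get? (pvA_dfs a n f memo u).2 u = some (pvLSet a n u) := by
  intro f
  induction f with
  | zero => intro u memo h _; exact absurd h (Nat.not_lt_zero _)
  | succ f ih =>
    intro u memo hmu hinv
    cases hm : PySem.Dict.get? memo u with
    | some s =>
      have hs := hinv u s hm
      simp only [pvA_dfs, hm]
      exact ⟨hs, hinv, fun k s' hk => hk, by rw [hs]⟩
    | none =>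
      by_cases hu : u < n
      · have hval : pvLSet a n u = PySem.Set.add PySem.Set.empty u := by
          unfold pvLSet; simp [pvSpecSet, hu]
        simp only [pvA_dfs, hm, if_pos hu]
        refine ⟨hval.symm, ?_, ?_, ?_⟩
        · intro k s' hk
          by_cases hku : k = u
          · subst hku
            rw [PySem.Dict.get?_insert_self] at hk
            rw [← Option.some.inj hk, hval]
          · rw [PySem.Dict.get?_insert_of_ne _ _ hku] at hk
            exact hinv k s' hk
        · intro k s' hk
          have hku : k ≠ u := by intro he; rw [he, hm] at hk; cases hk
          rw [PySem.Dict.get?_insert_of_ne _ _ hku]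
          exact hk
        · rw [PySem.Dict.get?_insert_self, hval]
      · have hnu : n ≤ u := not_lt.mp hu
        have hch : ∀ v ∈ pvChildren a u, pvMu a n v < pvMu a n u :=
          fun v hv => pvMu_child_lt a n hacyc u v hnu hv
        simp only [pvA_dfs, hm, if_neg hu]
        have haux : ∀ (cs : List Int), (∀ v ∈ cs, pvMu a n v < f) →
            ∀ (acc : PySem.Set Int × PySem.Dict Int (PySem.Set Int)), pvInvA a n acc.2 →
            (∀ k s, PySem.Dict.get? memo k = some s → PySem.Dict.get? acc.2 k = some s) →
            (cs.foldl (fun acc v =>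
                (PySem.Set.union acc.1 (pvA_dfs a n f acc.2 v).1, (pvA_dfs a n f acc.2 v).2)) acc).1
              = cs.foldl (fun s v => PySem.Set.union s (pvLSet a n v)) acc.1 ∧
            pvInvA a n (cs.foldl (fun acc v =>
                (PySem.Set.union acc.1 (pvA_dfs a n f acc.2 v).1, (pvA_dfs a n f acc.2 v).2)) acc).2 ∧
            (∀ k s, PySem.Dict.get? memo k = some s →
              PySem.Dict.get? (cs.foldl (fun acc v =>
                (PySem.Set.union acc.1 (pvA_dfs a n f acc.2 v).1, (pvA_dfs a n f acc.2 v).2)) acc).2 k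
                = some s) := by
          intro cs
          induction cs with
          | nil => intro _ acc h1 h2; exact ⟨rfl, h1, h2⟩
          | cons v cs ihc =>
            intro hcs acc hacc hpers
            simp only [List.foldl_cons]
            obtain ⟨hv1, hv2, hv3, _⟩ := ih v acc.2 (hcs v List.mem_cons_self) hacc
            rw [hv1]
            exact ihc (fun w hw => hcs w (List.mem_cons_of_mem _ hw))
              (PySem.Set.union acc.1 (pvLSet a n v), (pvA_dfs a n f acc.2 v).2) hv2
              (fun k s hk => hv3 k s (hpers k s hk))
        have hfold := haux (pvChildren a u) (fun v hv => by have := hch v hv; omega)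
          (PySem.Set.empty, memo) hinv (fun k s hk => hk)
        have hval : (((pvChildren a u).foldl (fun acc v =>
            (PySem.Set.union acc.1 (pvA_dfs a n f acc.2 v).1, (pvA_dfs a n f acc.2 v).2))
            (PySem.Set.empty, memo)).1) = pvLSet a n u := by
          rw [hfold.1]
          unfold pvLSet
          conv_rhs => rw [pvSpecSet]
          rw [if_neg hu]
          refine (PySem.List.foldl_congr_mem _ _ _ _ ?_).symm
          intro acc x hx
          have hμx := hch x hx
          rw [pvSpecSet_stable a n hacyc (pvMu a n u) (pvMu a n x + 1) x (by omega) (by omega)]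
        unfold pvChildren at hval hfold
        refine ⟨hval, ?_, ?_, ?_⟩
        · intro k s' hk
          by_cases hku : k = u
          · subst hku
            rw [PySem.Dict.get?_insert_self] at hk
            rw [← Option.some.inj hk, hval]
          · rw [PySem.Dict.get?_insert_of_ne _ _ hku] at hk
            exact hfold.2.1 k s' hk
        · intro k s' hk
          have hku : k ≠ u := by intro he; rw [he, hm] at hk; cases hk
          rw [PySem.Dict.get?_insert_of_ne _ _ hku]
          exact hfold.2.2 k s' hk
        · rw [PySem.Dict.get?_insert_self, hval]

theorem pvA_phase1 (a : List (Int × List Int)) (n : Int)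
    (hacyc : pvPeel a n (pvN a n) = []) :
    ∀ (l : List Int) memo, pvInvA a n memo →
      pvInvA a n (l.foldl (fun m u => (pvA_dfs a n (a.length + 1) m u).2) memo) ∧
      (∀ k s, PySem.Dict.get? memo k = some s →
        PySem.Dict.get? (l.foldl (fun m u => (pvA_dfs a n (a.length + 1) m u).2) memo) k = some s) ∧
      (∀ u ∈ l, PySem.Dict.get? (l.foldl (fun m u => (pvA_dfs a n (a.length + 1) m u).2) memo) u
        = some (pvLSet a n u)) := by
  intro l
  induction l with
  | nil => intro memo h; exact ⟨h, fun k s hk => hk, by simp⟩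
  | cons u l ihl =>
    intro memo hinv
    have hmu : pvMu a n u < a.length + 1 := by
      have h1 := pvMu_le_N a n hacyc u
      have h2 := pvN_le_len a n
      omega
    obtain ⟨_, hinv1, hpers1, hentry⟩ := pvA_run a n hacyc (a.length+1) u memo hmu hinv
    obtain ⟨hinv2, hpers2, hmem⟩ := ihl (pvA_dfs a n (a.length+1) memo u).2 hinv1
    simp only [List.foldl_cons]
    refine ⟨hinv2, fun k s hk => hpers2 k s (hpers1 k s hk), ?_⟩
    intro w hw
    rcases List.mem_cons.mp hw with hwu | hwl
    · rw [hwu]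
      exact hpers2 u _ hentry
    · exact hmem w hwl

theorem pvNormalize_eq (bits k n : Int) :
    pvA_normalize bits k n =
      (if 2*k < n then bits
       else if n < 2*k then PySem.Int.bxor ((1 <<< n.toNat) - 1) bits
       else min bits (PySem.Int.bxor ((1 <<< n.toNat) - 1) bits)) := by
  unfold pvA_normalize
  split_ifs <;> first | rfl | omega

-- ---------- B's fixpoint loop computes the spec ----------
theorem pvGet_mk_map (l : List (Int × List Int)) (f : List Int → Int) (u : Int) :
    PySem.Dict.get? (PySem.Dict.mk (l.map (fun p => (p.1, f p.2)))) u
      = (PySem.Dict.get? (PySem.Dict.mk l) u).map f := by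
  induction l with
  | nil => rfl
  | cons p rest ih =>
    obtain ⟨k, cs⟩ := p
    simp only [List.map_cons, PySem.Dict.get?_mk_cons]
    by_cases h : k == u
    · simp [h]
    · simp only [h, Bool.false_eq_true, if_false, ih]

theorem pvGet_mk_filter (a : List (Int × List Int)) (n u : Int) :
    PySem.Dict.get? (PySem.Dict.mk (a.filter (fun p => decide (n ≤ p.1)))) u
      = if n ≤ u then PySem.Dict.get? (PySem.Dict.mk a) u else none := by
  induction a with
  | nil =>
    by_cases h : n ≤ u
    · simp [h]
    · simp only [List.filter_nil, if_neg h]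
      rfl
  | cons p rest ih =>
    obtain ⟨k, cs⟩ := p
    by_cases hk : n ≤ k
    · rw [List.filter_cons_of_pos (by simpa using hk)]
      rw [PySem.Dict.get?_mk_cons, PySem.Dict.get?_mk_cons]
      by_cases hku : (k == u)
      · have : k = u := by simpa using hku
        subst this
        simp [hk]
      · simp only [hku, Bool.false_eq_true, if_false, ih]
    · rw [List.filter_cons_of_neg (by simpa using hk)]
      rw [ih, PySem.Dict.get?_mk_cons]
      by_cases hku : (k == u)
      · have : k = u := by simpa using hku
        subst this
        simp [hk]
      · simp only [hku, Bool.false_eq_true, if_false]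

-- getting an internal key's entry in the filtered dict
theorem pvGet_internal (a : List (Int × List Int)) (n u : Int) :
    PySem.Dict.get? (PySem.Dict.mk (pvB_internal a n)) u
      = if n ≤ u then PySem.Dict.get? (PySem.Dict.mk a) u else none := by
  unfold pvB_internal
  exact pvGet_mk_filter a n u

theorem pvFoldl_bor_zero : ∀ (cs : List Int),
    cs.foldl (fun m (_ : Int) => PySem.Int.bor m 0) (0 : Int) = 0 := by
  intro cs
  induction cs with
  | nil => rfl
  | cons v cs ih =>
    rw [List.foldl_cons, PySem.Int.bor_zero]
    exact ih

-- spec value of a node whose adjacency entry is missing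
theorem pvSpecMask_no_entry (a : List (Int × List Int)) (n : Int) (f : Nat) (u : Int)
    (hu : ¬ u < n) (h : PySem.Dict.get? (PySem.Dict.mk a) u = none) :
    pvSpecMask a n (f+1) u = 0 := by
  have hch : pvChildren a u = [] := by
    unfold pvChildren
    rw [PySem.Dict.getD_eq_get?_getD, h]
    rfl
  simp [pvSpecMask, hu, hch]

-- the pure Jacobi iterate
def pvBIter (a : List (Int × List Int)) (n : Int) : Nat → PySem.Dict Int Int
  | 0 => PySem.Dict.mk ((pvB_internal a n).map (fun p => (p.1, (0:Int))))
  | i+1 => pvB_step a n (pvBIter a n i)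

theorem pvBIter_get (a : List (Int × List Int)) (n : Int) :
    ∀ (i : Nat) (u : Int), PySem.Dict.get? (pvBIter a n i) u
      = (PySem.Dict.get? (PySem.Dict.mk (pvB_internal a n)) u).map
          (fun _ => pvSpecMask a n (i+1) u) := by
  intro i
  induction i with
  | zero =>
    intro u
    have hmap : PySem.Dict.get? (pvBIter a n 0) u
        = (PySem.Dict.get? (PySem.Dict.mk (pvB_internal a n)) u).map (fun _ => (0:Int)) :=
      pvGet_mk_map (pvB_internal a n) (fun _ => (0:Int)) u
    rw [hmap]
    cases hg : PySem.Dict.get? (PySem.Dict.mk (pvB_internal a n)) u with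
    | none => rfl
    | some cs =>
      simp only [Option.map_some, Option.some.injEq]
      rw [pvGet_internal] at hg
      by_cases hn : n ≤ u
      · rw [if_pos hn] at hg
        have : pvSpecMask a n (0+1) u = 0 := by
          conv_lhs => rw [pvSpecMask]
          rw [if_neg (by omega : ¬ u < n)]
          have h2 : (pvChildren a u).foldl (fun m v => PySem.Int.bor m (pvSpecMask a n 0 v)) 0
              = (pvChildren a u).foldl (fun m (_ : Int) => PySem.Int.bor m 0) 0 := by
            refine PySem.List.foldl_congr_mem _ _ _ _ ?_
            intro acc x hx
            rfl
          rw [h2, pvFoldl_bor_zero]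
        rw [this]
      · rw [if_neg hn] at hg; cases hg
  | succ i ih =>
    intro u
    have hmap : PySem.Dict.get? (pvBIter a n (i+1)) u
        = (PySem.Dict.get? (PySem.Dict.mk (pvB_internal a n)) u).map
            (pvB_orAll n (pvBIter a n i)) :=
      pvGet_mk_map (pvB_internal a n) (pvB_orAll n (pvBIter a n i)) u
    rw [hmap]
    cases hg : PySem.Dict.get? (PySem.Dict.mk (pvB_internal a n)) u with
    | none => rfl
    | some cs =>
      simp only [Option.map_some, Option.some.injEq]
      have hg' := hg
      rw [pvGet_internal] at hg'
      by_cases hn : n ≤ u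
      · rw [if_pos hn] at hg'
        have hch : pvChildren a u = cs := by
          unfold pvChildren
          rw [PySem.Dict.getD_eq_get?_getD, hg']
          rfl
        have hval : ∀ v : Int, pvB_val n (pvBIter a n i) v = pvSpecMask a n (i+1) v := by
          intro v
          unfold pvB_val
          by_cases hv : v < n
          · rw [if_pos hv]
            conv_rhs => rw [pvSpecMask]
            rw [if_pos hv]
          · rw [if_neg hv, PySem.Dict.getD_eq_get?_getD, ih v, pvGet_internal]
            rw [if_pos (by omega : n ≤ v)]
            cases hgv : PySem.Dict.get? (PySem.Dict.mk a) v with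
            | none =>
              simp only [Option.map_none, Option.getD_none]
              exact (pvSpecMask_no_entry a n i v hv hgv).symm
            | some _ => rfl
        show pvB_orAll n (pvBIter a n i) cs = pvSpecMask a n (i+1+1) u
        unfold pvB_orAll
        conv_rhs => rw [pvSpecMask]
        rw [if_neg (by omega : ¬ u < n), hch]
        refine (PySem.List.foldl_congr_mem _ _ _ _ ?_)
        intro acc x hx
        rw [hval x]
      · rw [if_neg hn] at hg'; cases hg'

-- the while-loop with break equals the pure iterate
theorem pvBIter_fix (a : List (Int × List Int)) (n : Int) (i : Nat)
    (h : pvB_step a n (pvBIter a n i) = pvBIter a n i) :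
    ∀ j, i ≤ j → pvBIter a n j = pvBIter a n i := by
  intro j
  induction j with
  | zero => intro hj; have : i = 0 := by omega
            rw [this]
  | succ j ih =>
    intro hj
    rcases Nat.lt_or_ge i (j+1) with hlt | hge
    · have hji : i ≤ j := by omega
      show pvB_step a n (pvBIter a n j) = pvBIter a n i
      rw [ih hji, h]
    · have : i = j + 1 := by omega
      rw [this]

theorem pvB_loop_eq_iter (a : List (Int × List Int)) (n : Int) :
    ∀ (k : Nat) (i : Nat), pvB_loop a n k (pvBIter a n i) = pvBIter a n (i + k) := by
  intro k
  induction k with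
  | zero => intro i; rfl
  | succ k ih =>
    intro i
    show (let new := pvB_step a n (pvBIter a n i);
          if new = pvBIter a n i then new else pvB_loop a n k new) = _
    by_cases h : pvB_step a n (pvBIter a n i) = pvBIter a n i
    · simp only [h, if_true]
      exact (pvBIter_fix a n i h (i + (k+1)) (by omega)).symm
    · simp only [if_neg h]
      have : pvB_step a n (pvBIter a n i) = pvBIter a n (i+1) := rfl
      rw [this, ih (i+1)]
      congr 1
      omega

-- the converged table entry read by B's edge scan is the leaf mask
theorem pvB_final_val (a : List (Int × List Int)) (n : Int)
    (hacyc : pvPeel a n (pvN a n) = []) (ch : Int) (_hch : 0 ≤ ch) :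
    pvB_val n (pvBIter a n a.length) ch = pvLMask a n ch := by
  have hmu : pvMu a n ch < a.length + 1 := by
    have h1 := pvMu_le_N a n hacyc ch
    have h2 := pvN_le_len a n
    omega
  unfold pvB_val
  by_cases hv : ch < n
  · rw [if_pos hv]
    unfold pvLMask
    simp [pvSpecMask, hv]
  · rw [if_neg hv, PySem.Dict.getD_eq_get?_getD, pvBIter_get a n a.length ch, pvGet_internal]
    rw [if_pos (by omega : n ≤ ch)]
    cases hg : PySem.Dict.get? (PySem.Dict.mk a) ch with
    | none =>
      simp only [Option.map_none, Option.getD_none]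
      unfold pvLMask
      exact (pvSpecMask_no_entry a n (pvMu a n ch) ch hv hg).symm
    | some _ =>
      simp only [Option.map_some, Option.getD_some]
      unfold pvLMask
      exact pvSpecMask_stable a n hacyc (a.length+1) (pvMu a n ch + 1) ch hmu (by omega)

-- ---------- the two edge scans agree ----------
theorem pvMain_scan (a : List (Int × List Int)) (n : Int)
    (hacyc : pvPeel a n (pvN a n) = [])
    (hnn : ∀ p ∈ a, ∀ v ∈ p.2, (0:Int) ≤ v)
    (leafMemo : PySem.Dict Int (PySem.Set Int))
    (hleaf : ∀ p ∈ a, ∀ ch ∈ p.2, PySem.Dict.get? leafMemo ch = some (pvLSet a n ch)) :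
    ∀ (l : List (Int × List Int)), (∀ p ∈ l, p ∈ a) →
    ∀ (splits : PySem.Set Int),
      l.foldl (fun (splits : PySem.Set Int) pc =>
        pc.2.foldl (fun (splits : PySem.Set Int) ch =>
          let subset := (PySem.Dict.get? leafMemo ch).getD PySem.Set.empty
          let k : Int := PySem.Set.len subset
          if 0 < k ∧ k < n then
            PySem.Set.add splits (pvA_normalize (pvA_to_bits subset) k n)
          else splits) splits) splits
      = l.foldl (fun (splits : PySem.Set Int) pc =>
          pc.2.foldl (fun (splits : PySem.Set Int) ch =>
            let m := pvB_val n (pvBIter a n a.length) ch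
            let k : Int := (PySem.Int.bitCount m : Int)
            if 0 < k ∧ k < n then
              let rep : Int :=
                if 2*k < n then m
                else if n < 2*k then PySem.Int.bxor ((1 <<< n.toNat) - 1) m
                else min m (PySem.Int.bxor ((1 <<< n.toNat) - 1) m)
              PySem.Set.add splits rep
            else splits) splits) splits := by
  intro l hl splits
  refine PySem.List.foldl_congr_mem _ _ _ _ ?_
  intro acc pc hpc
  have hpa : pc ∈ a := hl pc hpc
  refine PySem.List.foldl_congr_mem _ _ _ _ ?_
  intro acc2 ch hch
  have h0ch : (0:Int) ≤ ch := hnn pc hpa ch hch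
  have hget : PySem.Dict.get? leafMemo ch = some (pvLSet a n ch) := hleaf pc hpa ch hch
  have hk : PySem.Set.len (pvLSet a n ch) = ((PySem.Int.bitCount (pvLMask a n ch) : Nat) : Int) := by
    unfold pvLSet pvLMask
    exact pvLen_spec a n hnn _ ch h0ch
  have hbits : pvA_to_bits (pvLSet a n ch) = pvLMask a n ch := by
    unfold pvLSet pvLMask
    exact pvToBits_spec a n _ ch
  simp only [hget, Option.getD_some, pvB_final_val a n hacyc ch h0ch, hk, hbits,
    pvNormalize_eq]

-- ===== VERDICT (by name: the statement is the Claim_ definition above) =====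
theorem collect_unique_split_bitsets_py_spec : Claim_equal_collect_unique_split_bitsets_py := by
  intro adjacency n_leaves hdom hpre
  unfold Spec_collect_unique_split_bitsets_py
  unfold collect_unique_split_bitsets_py collect_unique_split_bitsets_py_alt
  by_cases hn : n_leaves ≤ 1
  · rw [if_pos hn, if_pos hn]
  · obtain ⟨hnn, hacyc⟩ := hpre (by omega)
    rw [if_neg hn, if_neg hn]
    have hempty : pvInvA adjacency n_leaves PySem.Dict.empty := by
      intro k s hk
      rw [PySem.Dict.get?_empty] at hk
      cases hk
    obtain ⟨_, _, hmemF⟩ := pvA_phase1 adjacency n_leaves hacyc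
      (PySem.Set.update (PySem.Set.update (PySem.Set.ofList (adjacency.map Prod.fst))
        (adjacency.flatMap Prod.snd)) (PySem.List.pyRange 0 n_leaves 1))
      PySem.Dict.empty hempty
    have hleaf : ∀ p ∈ adjacency, ∀ ch ∈ p.2,
        PySem.Dict.get? (pvA_compute_leaf_sets adjacency n_leaves) ch
          = some (pvLSet adjacency n_leaves ch) := by
      intro p hp ch hch
      refine hmemF ch ?_
      refine (PySem.Set.mem_update _ _ ch).mpr (Or.inl ?_)
      refine (PySem.Set.mem_update _ _ ch).mpr (Or.inr ?_)
      exact List.mem_flatMap.mpr ⟨p, hp, hch⟩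
    have hloop : pvB_loop adjacency n_leaves adjacency.length
        (PySem.Dict.mk ((pvB_internal adjacency n_leaves).map (fun p => (p.1, (0:Int)))))
        = pvBIter adjacency n_leaves adjacency.length := by
      have := pvB_loop_eq_iter adjacency n_leaves adjacency.length 0
      simpa using this
    rw [hloop]
    exact pvMain_scan adjacency n_leaves hacyc hnn
      (pvA_compute_leaf_sets adjacency n_leaves) hleaf adjacency
      (fun p hp => hp) PySem.Set.empty
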